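-- pv_equiv track=rewrite | github.com/Danwerk/Python-course | MX/mx_pyramid/pyramid.py | make_pyramid
-- ===== SOURCE A (Python) =====
-- def make_pyramid(base: int, char: str) -> list:
--     """
--     Construct a pyramid with given base.
--
--     Pyramid should consist of given chars, all empty spaces in the pyramid list are ' '. Pyramid height depends on base length. Lowest floor consists of base-number chars.
--     Every floor has 2 chars less than the floor lower to it.
--     make_pyramid(3, "A") ->
--     [
--         [' ', 'A', ' '],
--         ['A', 'A', 'A']
--     ]
--     make_pyramid(6, 'a') ->
--     [
--         [' ', ' ', 'a', 'a', ' ', ' '],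
--         [' ', 'a', 'a', 'a', 'a', ' '],
--         ['a', 'a', 'a', 'a', 'a', 'a']
--     ]
--     :param base: int
--     :param char: str
--     :return: list
--     """
--     empty_string = 0
--     base_stage = (base, empty_string)
--     tupl_to_append = [base_stage]
--     next_base = base_stage
--
--     if base % 2 != 0:  # odd num base
--         while next_base[0] > 1:
--             empty_string += 1
--             next_base = (base - 2, empty_string)
--             tupl_to_append.append(next_base)
--             base -= 2
--
--     elif base % 2 == 0:  # even num base
--         while next_base[0] > 2:
--             empty_string += 1
--             next_base = (base - 2, empty_string)
--             tupl_to_append.append(next_base)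
--             base -= 2
--
--     tupl_to_append.reverse()
--
--     lis = [' ' * tupl_to_append[i][1] + char * tupl_to_append[i][0] + ' ' * tupl_to_append[i][1] for i in
--            range(len(tupl_to_append))]
--     pyramid = [list(j) for j in lis]
--     return pyramid
-- ===== SOURCE B (Python) =====
-- def make_pyramid(base: int, char: str) -> list:
--     rows = max(1, (base + 1) // 2)
--     return [list(' ' * d + char * (base - 2 * d) + ' ' * d)
--             for d in range(rows - 1, -1, -1)]
-- ===== Notes on version B (the rewrite author's own statement) =====
-- stated objective: simpler
-- what changed: Replaces A's parity-split while-loop that builds a (width, padding) tuple table, reverses it and re-indexes it, by a single comprehension that renders each floor arithmetically from its index with rows = max(1, (base+1)//2).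
import Mathlib
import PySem

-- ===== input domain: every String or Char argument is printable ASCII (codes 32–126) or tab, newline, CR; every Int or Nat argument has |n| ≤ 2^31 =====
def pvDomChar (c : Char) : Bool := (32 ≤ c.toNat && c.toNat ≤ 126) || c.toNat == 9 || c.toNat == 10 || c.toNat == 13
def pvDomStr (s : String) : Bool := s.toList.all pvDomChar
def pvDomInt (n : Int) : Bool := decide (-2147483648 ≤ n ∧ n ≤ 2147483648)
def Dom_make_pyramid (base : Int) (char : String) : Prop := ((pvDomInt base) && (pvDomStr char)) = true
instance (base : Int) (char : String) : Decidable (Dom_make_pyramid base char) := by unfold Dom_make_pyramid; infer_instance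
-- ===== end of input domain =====

-- B replaces A's while-loop tuple table plus reverse by a single comprehension that
-- renders each floor arithmetically from its index (objective: simpler).
-- Python strings are modelled as List Char (PySem.Chars convention); list(s) is the
-- map to one-character strings.

-- ===== PORT A =====
-- A's while loop (both branches have the same body; only the bound differs):
-- while next_base[0] > limit: es += 1; append (base-2, es); base -= 2.
def pyramidLoop (limit base es : Int) (tupl : List (Int × Int)) : List (Int × Int) :=
  if _h : base > limit then
    pyramidLoop limit (base - 2) (es + 1) (tupl ++ [(base - 2, es + 1)])
  else tupl
termination_by (base - limit).toNat
decreasing_by omega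

def make_pyramid (base : Int) (char : String) : List (List String) :=
  let tupl_to_append : List (Int × Int) :=
    if PySem.Int.mod base 2 ≠ 0 then pyramidLoop 1 base 0 [(base, 0)]
    else pyramidLoop 2 base 0 [(base, 0)]
  let rev := tupl_to_append.reverse
  let lis : List (List Char) :=
    (PySem.List.pyRange 0 (PySem.List.len rev) 1).map (fun i =>
      let t := PySem.List.pyGetD rev i (0, 0)
      PySem.List.pyRepeat [' '] t.2 ++ PySem.List.pyRepeat char.toList t.1
        ++ PySem.List.pyRepeat [' '] t.2)
  lis.map (fun j => j.map (fun c => String.ofList [c]))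

-- ===== PORT B =====
def make_pyramid_alt (base : Int) (char : String) : List (List String) :=
  let rows := max 1 (PySem.Int.floordiv (base + 1) 2)
  (PySem.List.pyRange (rows - 1) (-1) (-1)).map (fun d =>
    (PySem.List.pyRepeat [' '] d ++ PySem.List.pyRepeat char.toList (base - 2 * d)
      ++ PySem.List.pyRepeat [' '] d).map (fun c => String.ofList [c]))

-- ===== PRECONDITION & SPEC =====
def Spec_make_pyramid (base : Int) (char : String) (out : List (List String)) : Prop := out = make_pyramid_alt base char
instance (base : Int) (char : String) (out : List (List String)) : Decidable (Spec_make_pyramid base char out) := by unfold Spec_make_pyramid; infer_instance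

-- ===== CLAIM (what is proved, stated in full; the proofs are below) =====
def Claim_equal_make_pyramid : Prop := ∀ (base : Int) (char : String), Dom_make_pyramid base char → Spec_make_pyramid base char (make_pyramid base char)

-- ===== LEMMAS AND PROOFS =====

def pvRow (char : String) (w s : Int) : List String :=
  (PySem.List.pyRepeat [' '] s ++ PySem.List.pyRepeat char.toList w
    ++ PySem.List.pyRepeat [' '] s).map (fun c => String.ofList [c])

theorem pyramidLoop_nil (limit base es : Int) (tupl : List (Int × Int))
    (h : ¬ base > limit) : pyramidLoop limit base es tupl = tupl := by
  unfold pyramidLoop; simp [h]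

theorem map_range_reverse {α : Type} (f : Nat → α) (n : Nat) :
    ((List.range n).map f).reverse = (List.range n).map (fun j => f (n - 1 - j)) := by
  apply List.ext_getElem (by simp)
  intro i h1 h2
  simp only [List.getElem_reverse, List.getElem_map, List.getElem_range, List.length_map,
    List.length_range]

theorem pyramidLoop_spec (k : Nat) : ∀ (limit base es : Int) (tupl : List (Int × Int)),
    base - limit = 2 * k →
    pyramidLoop limit base es tupl
      = tupl ++ (List.range k).map (fun (j : Nat) => (base - 2 * ((j : Int) + 1), es + ((j : Int) + 1))) := by
  induction k with
  | zero =>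
    intro limit base es tupl h
    rw [pyramidLoop_nil limit base es tupl (by omega)]
    simp
  | succ m ih =>
    intro limit base es tupl h
    unfold pyramidLoop
    rw [dif_pos (by omega : base > limit)]
    rw [ih limit (base - 2) (es + 1) _ (by omega)]
    rw [List.append_assoc, List.singleton_append, List.range_succ_eq_map, List.map_cons,
        List.map_map]
    refine congrArg₂ _ rfl (congrArg₂ _ ?_ (List.map_congr_left fun j hj => ?_))
    · norm_num
    · simp only [Function.comp, Prod.mk.injEq]
      constructor <;> (push_cast; ring)

theorem tupl_closed (base : Int) (k : Nat) :
    ((base, (0:Int)) :: (List.range k).map (fun (j : Nat) => (base - 2 * ((j : Int) + 1), (0:Int) + ((j : Int) + 1))))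
      = (List.range (k+1)).map (fun (j : Nat) => (base - 2 * (j : Int), (j : Int))) := by
  rw [List.range_succ_eq_map, List.map_cons, List.map_map]
  refine congrArg₂ _ ?_ (List.map_congr_left fun j hj => ?_)
  · norm_num
  · simp only [Function.comp, Prod.mk.injEq]
    constructor <;> (push_cast; ring)

theorem core (base : Int) (char : String) (k : Nat) :
    (((List.range (k+1)).map (fun (j : Nat) => (base - 2 * (j : Int), (j : Int)))).reverse).map
        (fun t => pvRow char t.1 t.2)
      = (PySem.List.pyRange ((k : Int) + 1 - 1) (-1) (-1)).map (fun d => pvRow char (base - 2 * d) d) := by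
  rw [PySem.List.pyRange_neg_one]
  rw [show (((k : Int) + 1 - 1) - (-1)).toNat = k + 1 by omega]
  rw [map_range_reverse, List.map_map, List.map_map]
  refine List.map_congr_left fun j hj => ?_
  simp only [Function.comp]
  rw [List.mem_range] at hj
  have h1 : ((k + 1 - 1 - j : Nat) : Int) = (k : Int) + 1 - 1 - (j : Int) := by push_cast; omega
  congr 1; omega

theorem map_index (l : List (Int × Int)) (f : Int × Int → List String) :
    (PySem.List.pyRange 0 (PySem.List.len l) 1).map (fun i => f (PySem.List.pyGetD l i (0, 0)))
      = l.map f := by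
  rw [show (fun i => f (PySem.List.pyGetD l i (0, 0)))
        = f ∘ (fun i => PySem.List.pyGetD l i (0, 0)) from rfl,
      ← List.map_map, PySem.List.map_pyGetD_pyRange_zero]

theorem A_eq (base : Int) (char : String) :
    make_pyramid base char
      = ((if PySem.Int.mod base 2 ≠ 0 then pyramidLoop 1 base 0 [(base, 0)]
          else pyramidLoop 2 base 0 [(base, 0)]).reverse).map (fun t => pvRow char t.1 t.2) := by
  dsimp only [make_pyramid]
  generalize (if PySem.Int.mod base 2 ≠ 0 then pyramidLoop 1 base 0 [(base, 0)]
      else pyramidLoop 2 base 0 [(base, 0)]).reverse = l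
  rw [List.map_map]
  exact map_index l (fun t => pvRow char t.1 t.2)

theorem B_eq (base : Int) (char : String) :
    make_pyramid_alt base char
      = (PySem.List.pyRange (max 1 (PySem.Int.floordiv (base + 1) 2) - 1) (-1) (-1)).map
          (fun d => pvRow char (base - 2 * d) d) := by
  rfl

theorem degenerate (base : Int) (char : String) :
    ([((base, (0:Int)))].reverse).map (fun t => pvRow char t.1 t.2)
      = (PySem.List.pyRange ((1:Int) - 1) (-1) (-1)).map (fun d => pvRow char (base - 2 * d) d) := by
  rw [PySem.List.pyRange_neg_one]
  norm_num

theorem make_pyramid_spec' (base : Int) (char : String) :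
    make_pyramid base char = make_pyramid_alt base char := by
  rw [A_eq, B_eq]
  by_cases hm : PySem.Int.mod base 2 = 0
  · rw [if_neg (by simpa using hm)]
    have hdvd : (2:Int) ∣ base := (PySem.Int.mod_eq_zero_iff_dvd base 2).1 hm
    by_cases hgt : base > 2
    · obtain ⟨k, hk⟩ : ∃ k : Nat, base - 2 = 2 * k := ⟨(base / 2 - 1).toNat, by omega⟩
      rw [pyramidLoop_spec k 2 base 0 _ hk, List.singleton_append, tupl_closed]
      have hrow : max 1 (PySem.Int.floordiv (base + 1) 2) = (k : Int) + 1 := by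
        rw [PySem.Int.floordiv_eq_ediv_of_pos (by norm_num)]; omega
      rw [hrow]
      exact core base char k
    · rw [pyramidLoop_nil _ _ _ _ hgt]
      have hrow : max 1 (PySem.Int.floordiv (base + 1) 2) = 1 := by
        rw [PySem.Int.floordiv_eq_ediv_of_pos (by norm_num)]; omega
      rw [hrow]
      exact degenerate base char
  · rw [if_pos (by simpa using hm)]
    have hdvd : ¬ (2:Int) ∣ base := fun h => hm ((PySem.Int.mod_eq_zero_iff_dvd base 2).2 h)
    by_cases hgt : base > 1
    · obtain ⟨k, hk⟩ : ∃ k : Nat, base - 1 = 2 * k := ⟨((base - 1) / 2).toNat, by omega⟩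
      rw [pyramidLoop_spec k 1 base 0 _ hk, List.singleton_append, tupl_closed]
      have hrow : max 1 (PySem.Int.floordiv (base + 1) 2) = (k : Int) + 1 := by
        rw [PySem.Int.floordiv_eq_ediv_of_pos (by norm_num)]; omega
      rw [hrow]
      exact core base char k
    · rw [pyramidLoop_nil _ _ _ _ hgt]
      have hrow : max 1 (PySem.Int.floordiv (base + 1) 2) = 1 := by
        rw [PySem.Int.floordiv_eq_ediv_of_pos (by norm_num)]; omega
      rw [hrow]
      exact degenerate base char

-- ===== VERDICT (by name: the statement is the Claim_ definition above) =====
theorem make_pyramid_spec : Claim_equal_make_pyramid := by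
  intro base char _
  exact make_pyramid_spec' base char
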